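-- pv_equiv track=rewrite | github.com/baptistecottier/advents-of-code | events/year_2024/day_15/day_15.py | move_vertically
-- ===== SOURCE A (Python) =====
-- def move_vertically(
--         x: int,
--         y: int,
--         dy: int,
--         boxes: set[tuple[int, int]],
--         walls: set[tuple[int, int]]
--         ) -> tuple[set[tuple[int, int]], int, int]:
--     """
--     In the case of a vertical move, a single box can push several boxes. Hence, we
--     need to check not only the position aligned with the box but also on the sides:
--
--                                 direction = (0, -1)
--                     ......      ......      ......      ......
--                     ..[]..      .[]...      .[][].      ...[].
--                     ..[]..      ..[]..      ..[]..      ..[]..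
--                     ......      ......      ......      ......
--
--     The box finding process is applied recursively until an empty space or a wall is
--     met. If a wall is met, the whole move is blocked, nothing happens. Otherwise,
--     all boxes moves accordingly to the vertical direction. The function returns the
--     updated (potentially unchanged) set of boxes and robot position.
--     """
--     delta = (x - 1, y + dy) in boxes
--     span = set([(x - delta, y + dy)])
--     to_move = set([(x - delta, y + dy)])
--
--     while span:
--         tx, ty = span.pop()
--         for kx in (-1, 0, 1):
--             if kx != -1 and (tx + kx, ty + dy) in walls:
--                 return boxes, x, y
--             if (tx + kx, ty + dy) in boxes:
--                 to_move.add((tx + kx, ty + dy))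
--                 span.add((tx + kx, ty + dy))
--
--     boxes.difference_update(to_move)
--     boxes.update({(tx, ty + dy) for (tx, ty) in to_move})
--     return boxes, x, y + dy
-- ===== SOURCE B (Python) =====
-- def move_vertically(x, y, dy, boxes, walls):
--     """Fixpoint formulation: saturate the set of pushed cells over the parent
--     relation, then check walls once over the whole set, then commit (mutating
--     `boxes` in place, like the original)."""
--     delta = (x - 1, y + dy) in boxes
--     start = (x - delta, y + dy)
--     moved = {start}
--     changed = True
--     while changed:
--         changed = False
--         for (bx, by) in boxes:
--             if (bx, by) not in moved and (
--                     (bx - 1, by - dy) in moved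
--                     or (bx, by - dy) in moved
--                     or (bx + 1, by - dy) in moved):
--                 moved.add((bx, by))
--                 changed = True
--     if any((mx, my + dy) in walls or (mx + 1, my + dy) in walls
--            for (mx, my) in moved):
--         return boxes, x, y
--     boxes.difference_update(moved)
--     boxes.update({(mx, my + dy) for (mx, my) in moved})
--     return boxes, x, y + dy
-- ===== Notes on version B (the rewrite author's own statement) =====
-- stated objective: alternative
-- what changed: Replaces the destructive worklist (pop a frontier cell, expand children, abort mid-exploration on a wall) by a three-phase fixpoint formulation: saturate the moved set by repeatedly scanning boxes for cells whose parent is already moved, then one wall check over the whole set, then commit.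
-- outside the precondition, e.g. on move_vertically(0, 0, 0, set(), set()): A returns ({(0, 0)}, 0, 0), B returns ({(0, 0)}, 0, 0)
import Mathlib
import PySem

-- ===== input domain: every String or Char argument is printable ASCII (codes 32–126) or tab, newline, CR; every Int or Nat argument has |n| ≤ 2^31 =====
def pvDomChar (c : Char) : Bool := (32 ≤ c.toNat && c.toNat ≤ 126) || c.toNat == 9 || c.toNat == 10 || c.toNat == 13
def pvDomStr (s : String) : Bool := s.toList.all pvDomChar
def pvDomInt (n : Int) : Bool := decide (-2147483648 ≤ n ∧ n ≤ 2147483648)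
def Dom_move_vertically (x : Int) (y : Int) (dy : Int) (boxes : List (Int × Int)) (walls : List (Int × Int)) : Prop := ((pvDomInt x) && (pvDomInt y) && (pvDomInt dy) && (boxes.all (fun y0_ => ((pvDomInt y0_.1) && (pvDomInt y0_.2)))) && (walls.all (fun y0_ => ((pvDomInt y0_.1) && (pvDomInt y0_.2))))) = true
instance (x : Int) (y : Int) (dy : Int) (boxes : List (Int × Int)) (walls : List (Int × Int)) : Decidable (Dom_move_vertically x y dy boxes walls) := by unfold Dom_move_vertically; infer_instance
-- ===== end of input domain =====

-- B replaces A's destructive frontier worklist by a three-phase fixpoint saturation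
-- (saturate, then one wall scan, then commit); same return value, and both Pythons
-- mutate the `boxes` set in place in the same way (equivalence here is about the value).

-- ===== PORT A =====
-- Shared by both ports' commit phase: Python's iteration order over the `to_move`
-- set in `{(tx, ty + dy) for (tx, ty) in to_move}` is hash order, which PySem does
-- not model (the result is a set, so no order is observable).  We iterate the
-- elements of `moved` (always ⊆ boxes ∪ {start}, with start ∈ moved) in the fixed
-- representative order: boxes-list order, then `start` if it is not a box.
def mvCommit (boxes : List (Int × Int)) (dy : Int) (start : Int × Int) (moved : List (Int × Int)) : List (Int × Int) :=
  let iter := boxes.filter (fun b => moved.contains b) ++ (if boxes.contains start then [] else [start])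
  PySem.Set.update (PySem.Set.diff boxes moved) (iter.map (fun t => (t.1, t.2 + dy)))

-- one `kx` of A's inner `for kx in (-1, 0, 1)` loop over the popped cell `t`:
-- wall check (only for kx ≠ -1; `none` = the early `return boxes, x, y`),
-- then conditional add to both `to_move` and `span`.
def mvStepA (boxes walls : List (Int × Int)) (dy : Int) (t : Int × Int)
    (st : Option (List (Int × Int) × List (Int × Int))) (kx : Int) :
    Option (List (Int × Int) × List (Int × Int)) :=
  match st with
  | none => none
  | some (span, toMove) =>
    let c := (t.1 + kx, t.2 + dy)
    if kx != -1 && walls.contains c then none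
    else if boxes.contains c then some (PySem.Set.add span c, PySem.Set.add toMove c)
    else some (span, toMove)

-- A's `while span:` worklist.  `span` is a Python set whose pop order is
-- unmodelled hash order; we pop the oldest element (FIFO), a fixed representative.
-- The fuel only makes the recursion total: for dy ≠ 0 it is proved sufficient
-- (each iteration processes a never-before-processed cell of boxes ∪ {start}).
def mvLoopA (boxes walls : List (Int × Int)) (dy : Int) :
    Nat → List (Int × Int) → List (Int × Int) → Option (List (Int × Int))
  | _, [], toMove => some toMove
  | 0, _ :: _, toMove => some toMove
  | f + 1, t :: rest, toMove =>
    match [(-1 : Int), 0, 1].foldl (mvStepA boxes walls dy t) (some (rest, toMove)) with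
    | none => none
    | some (span', toMove') => mvLoopA boxes walls dy f span' toMove'

def move_vertically (x : Int) (y : Int) (dy : Int) (boxes : List (Int × Int)) (walls : List (Int × Int)) : (List (Int × Int)) × Int × Int :=
  let delta : Int := if boxes.contains (x - 1, y + dy) then 1 else 0
  let start := (x - delta, y + dy)
  match mvLoopA boxes walls dy (boxes.length + 2) [start] [start] with
  | none => (boxes, x, y)
  | some toMove => (mvCommit boxes dy start toMove, x, y + dy)

-- ===== PORT B =====
-- one pass of B's `for (bx, by) in boxes:` scan (boxes is a set; its iteration
-- order is unmodelled and the resulting fixpoint is order-independent; we scan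
-- in input-list order): add every box whose parent cell is already in `moved`.
def mvPassB (boxes : List (Int × Int)) (dy : Int) (st : List (Int × Int) × Bool) : List (Int × Int) × Bool :=
  boxes.foldl (fun (st : List (Int × Int) × Bool) b =>
    if !st.1.contains b &&
        (st.1.contains (b.1 - 1, b.2 - dy) || st.1.contains (b.1, b.2 - dy) ||
         st.1.contains (b.1 + 1, b.2 - dy)) then
      (st.1 ++ [b], true)
    else st) st

-- B's `while changed:` saturation loop; fuel boxes.length + 1 is sufficient since
-- every pass with changed = true strictly grows `moved` inside boxes ∪ {start}.
def mvSatB (boxes : List (Int × Int)) (dy : Int) : Nat → List (Int × Int) → List (Int × Int)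
  | 0, moved => moved
  | f + 1, moved =>
    match mvPassB boxes dy (moved, false) with
    | (m', changed) => if changed then mvSatB boxes dy f m' else m'

def move_vertically_alt (x : Int) (y : Int) (dy : Int) (boxes : List (Int × Int)) (walls : List (Int × Int)) : (List (Int × Int)) × Int × Int :=
  let delta : Int := if boxes.contains (x - 1, y + dy) then 1 else 0
  let start := (x - delta, y + dy)
  let moved := mvSatB boxes dy (boxes.length + 1) [start]
  if moved.any (fun m => walls.contains (m.1, m.2 + dy) || walls.contains (m.1 + 1, m.2 + dy)) then
    (boxes, x, y)
  else
    (mvCommit boxes dy start moved, x, y + dy)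

-- ===== PRECONDITION & SPEC =====
-- Pre_ excludes dy = 0 only: there A's worklist re-adds already-popped cells and
-- loops forever whenever it discovers any box (e.g. a box on the start cell);
-- B always terminates, and on the remaining terminating dy = 0 inputs the
-- equivalence is not claimed.
def Pre_move_vertically (x : Int) (y : Int) (dy : Int) (boxes : List (Int × Int)) (walls : List (Int × Int)) : Prop := dy ≠ 0
instance (x : Int) (y : Int) (dy : Int) (boxes : List (Int × Int)) (walls : List (Int × Int)) : Decidable (Pre_move_vertically x y dy boxes walls) := by unfold Pre_move_vertically; infer_instance
def pvWitness_move_vertically : Int × Int × Int × (List (Int × Int)) × (List (Int × Int)) := (0, 0, 1, [(0, 1)], [(2, 2)])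

def Spec_move_vertically (x : Int) (y : Int) (dy : Int) (boxes : List (Int × Int)) (walls : List (Int × Int)) (out : (List (Int × Int)) × Int × Int) : Prop := out = move_vertically_alt x y dy boxes walls
instance (x : Int) (y : Int) (dy : Int) (boxes : List (Int × Int)) (walls : List (Int × Int)) (out : (List (Int × Int)) × Int × Int) : Decidable (Spec_move_vertically x y dy boxes walls out) := by unfold Spec_move_vertically; infer_instance

-- ===== CLAIM (what is proved, stated in full; the proofs are below) =====
def Claim_equal_move_vertically : Prop := ∀ (x : Int) (y : Int) (dy : Int) (boxes : List (Int × Int)) (walls : List (Int × Int)), Dom_move_vertically x y dy boxes walls → Pre_move_vertically x y dy boxes walls → Spec_move_vertically x y dy boxes walls (move_vertically x y dy boxes walls)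

-- ===== LEMMAS AND PROOFS =====

-- the child relation: processing cell c discovers box b (one of the three cells above/below c)
def mvRel (boxes : List (Int × Int)) (dy : Int) (c b : Int × Int) : Prop :=
  b ∈ boxes ∧ b.2 = c.2 + dy ∧ (b.1 = c.1 - 1 ∨ b.1 = c.1 ∨ b.1 = c.1 + 1)

def mvReach (boxes : List (Int × Int)) (dy : Int) (start c : Int × Int) : Prop :=
  Relation.ReflTransGen (mvRel boxes dy) start c

def mvWall (walls : List (Int × Int)) (dy : Int) (c : Int × Int) : Prop :=
  (c.1, c.2 + dy) ∈ walls ∨ (c.1 + 1, c.2 + dy) ∈ walls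

-- the conditional double add of A's inner loop, as a state transformer (proof-side name)
def mvAddB (boxes : List (Int × Int)) (st : List (Int × Int) × List (Int × Int)) (c : Int × Int) :
    List (Int × Int) × List (Int × Int) :=
  if boxes.contains c then (PySem.Set.add st.1 c, PySem.Set.add st.2 c) else st

-- loop invariant of A's worklist (FIFO queue `span`, accumulated `toMove`)
def mvInvA (boxes walls : List (Int × Int)) (dy : Int) (start : Int × Int)
    (span toMove : List (Int × Int)) : Prop :=
  span ⊆ toMove ∧ toMove.Nodup ∧ span.Nodup ∧
  (∀ c ∈ toMove, mvReach boxes dy start c) ∧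
  (∀ c ∈ toMove, c = start ∨ c ∈ boxes) ∧
  (∀ p ∈ toMove, p ∉ span → ¬ mvWall walls dy p ∧ ∀ b, mvRel boxes dy p b → b ∈ toMove) ∧
  start ∈ toMove ∧
  span.Pairwise (fun a b => dy * a.2 ≤ dy * b.2) ∧
  (∀ a ∈ span, ∀ b ∈ span, dy * a.2 ≤ dy * b.2 + dy * dy) ∧
  (∀ p ∈ toMove, p ∉ span → ∀ q ∈ span, dy * p.2 ≤ dy * q.2)

-- invariant holding mid-way through expanding the popped cell h
def mvMidInv (boxes walls : List (Int × Int)) (dy : Int) (start h : Int × Int)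
    (s m : List (Int × Int)) : Prop :=
  s ⊆ m ∧ m.Nodup ∧ s.Nodup ∧
  (∀ c ∈ m, mvReach boxes dy start c) ∧
  (∀ c ∈ m, c = start ∨ c ∈ boxes) ∧
  (∀ p ∈ m, p ∉ s → p = h ∨ (¬ mvWall walls dy p ∧ ∀ b, mvRel boxes dy p b → b ∈ m)) ∧
  start ∈ m ∧
  s.Pairwise (fun a b => dy * a.2 ≤ dy * b.2) ∧
  (∀ p ∈ m, p ∉ s → dy * p.2 ≤ dy * h.2) ∧
  (∀ q ∈ s, dy * h.2 ≤ dy * q.2) ∧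
  (∀ q ∈ s, dy * q.2 ≤ dy * h.2 + dy * dy) ∧
  h ∈ m ∧ h ∉ s

lemma mvParent_iff (m : List (Int × Int)) (dy : Int) (b : Int × Int) :
    (m.contains (b.1 - 1, b.2 - dy) || m.contains (b.1, b.2 - dy) || m.contains (b.1 + 1, b.2 - dy)) = true
    ↔ ∃ p ∈ m, b.2 = p.2 + dy ∧ (b.1 = p.1 - 1 ∨ b.1 = p.1 ∨ b.1 = p.1 + 1) := by
  simp only [Bool.or_eq_true, List.contains_iff_mem]
  constructor
  · rintro ((h1 | h1) | h1)
    · refine ⟨(b.1 - 1, b.2 - dy), h1, ⟨by ring, Or.inr (Or.inr (by ring))⟩⟩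
    · refine ⟨(b.1, b.2 - dy), h1, ⟨by ring, Or.inr (Or.inl rfl)⟩⟩
    · refine ⟨(b.1 + 1, b.2 - dy), h1, ⟨by ring, Or.inl (by ring)⟩⟩
  · rintro ⟨p, hp, h2, (h1 | h1 | h1)⟩
    · refine Or.inr ?_
      have hp' : (b.1 + 1, b.2 - dy) = p := by
        obtain ⟨p1, p2⟩ := p; simp only [Prod.mk.injEq]; simp at h1 h2; omega
      exact hp' ▸ hp
    · refine Or.inl (Or.inr ?_)
      have hp' : (b.1, b.2 - dy) = p := by
        obtain ⟨p1, p2⟩ := p; simp only [Prod.mk.injEq]; simp at h1 h2; omega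
      exact hp' ▸ hp
    · refine Or.inl (Or.inl ?_)
      have hp' : (b.1 - 1, b.2 - dy) = p := by
        obtain ⟨p1, p2⟩ := p; simp only [Prod.mk.injEq]; simp at h1 h2; omega
      exact hp' ▸ hp

lemma mvPassB_prefix (dy : Int) : ∀ (bs : List (Int × Int)) (m : List (Int × Int)) (ch : Bool),
    m <+: (mvPassB bs dy (m, ch)).1 := by
  intro bs
  induction bs with
  | nil => intro m ch; simp [mvPassB]
  | cons b bs ih =>
    intro m ch
    simp only [mvPassB, List.foldl_cons] at ih ⊢
    by_cases hg : (!m.contains b && (m.contains (b.1 - 1, b.2 - dy) || m.contains (b.1, b.2 - dy) ||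
        m.contains (b.1 + 1, b.2 - dy))) = true
    · simp only [hg, if_true]
      exact (List.prefix_append m [b]).trans (ih (m ++ [b]) true)
    · simp only [hg, if_false]
      exact ih m ch

lemma mvPassB_snd_true (dy : Int) : ∀ (bs : List (Int × Int)) (m : List (Int × Int)),
    (mvPassB bs dy (m, true)).2 = true := by
  intro bs
  induction bs with
  | nil => intro m; simp [mvPassB]
  | cons b bs ih =>
    intro m
    simp only [mvPassB, List.foldl_cons] at ih ⊢
    by_cases hg : (!m.contains b && (m.contains (b.1 - 1, b.2 - dy) || m.contains (b.1, b.2 - dy) ||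
        m.contains (b.1 + 1, b.2 - dy))) = true
    · simp only [hg, if_true]; exact ih (m ++ [b])
    · simp only [hg, if_false]; exact ih m

lemma mvPassB_fix (dy : Int) : ∀ (bs : List (Int × Int)) (m : List (Int × Int)),
    (mvPassB bs dy (m, false)).2 = false →
    (mvPassB bs dy (m, false)).1 = m ∧
    ∀ b ∈ bs, b ∉ m →
      (m.contains (b.1 - 1, b.2 - dy) || m.contains (b.1, b.2 - dy) || m.contains (b.1 + 1, b.2 - dy)) = false := by
  intro bs
  induction bs with
  | nil => intro m _; simp [mvPassB]
  | cons b bs ih =>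
    intro m hsnd
    simp only [mvPassB, List.foldl_cons] at ih hsnd ⊢
    by_cases hg : (!m.contains b && (m.contains (b.1 - 1, b.2 - dy) || m.contains (b.1, b.2 - dy) ||
        m.contains (b.1 + 1, b.2 - dy))) = true
    · exfalso
      rw [if_pos hg] at hsnd
      have := mvPassB_snd_true dy bs (m ++ [b])
      simp only [mvPassB] at this
      rw [this] at hsnd
      simp at hsnd
    · rw [if_neg hg] at hsnd ⊢
      obtain ⟨he, hrest⟩ := ih m hsnd
      refine ⟨he, ?_⟩
      intro b' hb' hbm
      rcases List.mem_cons.mp hb' with hb' | hb'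
      · subst hb'
        have hcb : m.contains b' = false := by
          rcases h : m.contains b' with _ | _
          · rfl
          · exact absurd (List.contains_iff_mem.mp h) hbm
        rcases h : (m.contains (b'.1 - 1, b'.2 - dy) || m.contains (b'.1, b'.2 - dy) ||
            m.contains (b'.1 + 1, b'.2 - dy)) with _ | _
        · rfl
        · exact absurd (show (!m.contains b' && (m.contains (b'.1 - 1, b'.2 - dy) ||
            m.contains (b'.1, b'.2 - dy) || m.contains (b'.1 + 1, b'.2 - dy))) = true by
              rw [hcb, h]; rfl) hg
      · exact hrest b' hb' hbm

lemma mvPassB_mem (dy : Int) : ∀ (bs : List (Int × Int)) (m : List (Int × Int)) (ch : Bool)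
    (c : Int × Int), c ∈ (mvPassB bs dy (m, ch)).1 → c ∈ m ∨ c ∈ bs := by
  intro bs
  induction bs with
  | nil => intro m ch c hc; simp [mvPassB] at hc; exact Or.inl hc
  | cons b bs ih =>
    intro m ch c hc
    simp only [mvPassB, List.foldl_cons] at hc
    by_cases hg : (!m.contains b && (m.contains (b.1 - 1, b.2 - dy) || m.contains (b.1, b.2 - dy) ||
        m.contains (b.1 + 1, b.2 - dy))) = true
    · rw [if_pos hg] at hc
      rcases ih (m ++ [b]) true c hc with h | h
      · rcases List.mem_append.mp h with h | h
        · exact Or.inl h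
        · simp at h; subst h; exact Or.inr (List.mem_cons_self ..)
      · exact Or.inr (List.mem_cons_of_mem _ h)
    · rw [if_neg hg] at hc
      rcases ih m ch c hc with h | h
      · exact Or.inl h
      · exact Or.inr (List.mem_cons_of_mem _ h)

lemma mvPassB_nodup (dy : Int) : ∀ (bs : List (Int × Int)) (m : List (Int × Int)) (ch : Bool),
    m.Nodup → (mvPassB bs dy (m, ch)).1.Nodup := by
  intro bs
  induction bs with
  | nil => intro m ch hm; simpa [mvPassB] using hm
  | cons b bs ih =>
    intro m ch hm
    simp only [mvPassB, List.foldl_cons]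
    by_cases hg : (!m.contains b && (m.contains (b.1 - 1, b.2 - dy) || m.contains (b.1, b.2 - dy) ||
        m.contains (b.1 + 1, b.2 - dy))) = true
    · rw [if_pos hg]
      have hbm : b ∉ m := by
        intro hmem
        have hc : m.contains b = true := List.contains_iff_mem.mpr hmem
        simp [hc] at hg
        exact hg.1 hmem
      have : (m ++ [b]).Nodup := by
        simp [List.nodup_append, hm]
        intro a c hac he
        exact hbm (he ▸ hac)
      exact ih (m ++ [b]) true this
    · rw [if_neg hg]
      exact ih m ch hm

lemma mvPassB_reach (boxes : List (Int × Int)) (dy : Int) (start : Int × Int) :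
    ∀ (bs : List (Int × Int)), (∀ b ∈ bs, b ∈ boxes) →
    ∀ (m : List (Int × Int)) (ch : Bool), (∀ c ∈ m, mvReach boxes dy start c) →
    ∀ c ∈ (mvPassB bs dy (m, ch)).1, mvReach boxes dy start c := by
  intro bs
  induction bs with
  | nil => intro _ m ch hm c hc; simp [mvPassB] at hc; exact hm c hc
  | cons b bs ih =>
    intro hbs m ch hm c hc
    simp only [mvPassB, List.foldl_cons] at hc
    by_cases hg : (!m.contains b && (m.contains (b.1 - 1, b.2 - dy) || m.contains (b.1, b.2 - dy) ||
        m.contains (b.1 + 1, b.2 - dy))) = true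
    · rw [if_pos hg] at hc
      have hb : b ∈ boxes := hbs b (List.mem_cons_self ..)
      have hm' : ∀ c ∈ m ++ [b], mvReach boxes dy start c := by
        intro c' hc'
        rcases List.mem_append.mp hc' with h | h
        · exact hm c' h
        · have hcb2 : c' = b := List.mem_singleton.mp h
          rw [hcb2]
          simp only [Bool.and_eq_true] at hg
          obtain ⟨p, hp, hrel1, hrel2⟩ := (mvParent_iff m dy b).mp hg.2
          exact Relation.ReflTransGen.tail (hm p hp) ⟨hb, hrel1, hrel2⟩
      exact ih (fun b' hb' => hbs b' (List.mem_cons_of_mem _ hb')) (m ++ [b]) true hm' c hc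
    · rw [if_neg hg] at hc
      exact ih (fun b' hb' => hbs b' (List.mem_cons_of_mem _ hb')) m ch hm c hc

lemma mvPassB_grow (dy : Int) : ∀ (bs : List (Int × Int)) (m : List (Int × Int)),
    (mvPassB bs dy (m, false)).2 = true → m.length < (mvPassB bs dy (m, false)).1.length := by
  intro bs
  induction bs with
  | nil => intro m h; simp [mvPassB] at h
  | cons b bs ih =>
    intro m h
    simp only [mvPassB, List.foldl_cons] at h ⊢
    by_cases hg : (!m.contains b && (m.contains (b.1 - 1, b.2 - dy) || m.contains (b.1, b.2 - dy) ||
        m.contains (b.1 + 1, b.2 - dy))) = true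
    · rw [if_pos hg]
      have hpre := mvPassB_prefix dy bs (m ++ [b]) true
      simp only [mvPassB] at hpre
      calc m.length < (m ++ [b]).length := by simp
        _ ≤ _ := hpre.length_le
    · rw [if_neg hg] at h ⊢
      exact ih m h

lemma mvSatB_spec (boxes : List (Int × Int)) (dy : Int) (start : Int × Int) :
    ∀ (f : Nat) (m : List (Int × Int)), m.Nodup → (∀ c ∈ m, c = start ∨ c ∈ boxes) →
    (∀ c ∈ m, mvReach boxes dy start c) → start ∈ m →
    boxes.length + 2 ≤ f + m.length →
    (∀ c ∈ mvSatB boxes dy f m, mvReach boxes dy start c) ∧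
    start ∈ mvSatB boxes dy f m ∧
    (∀ p b, p ∈ mvSatB boxes dy f m → mvRel boxes dy p b → b ∈ mvSatB boxes dy f m) := by
  intro f
  induction f with
  | zero =>
    intro m hnd hsub _ _ hfuel
    exfalso
    have hsub' : m ⊆ start :: boxes := by
      intro c hc
      rcases hsub c hc with h | h
      · simp [h]
      · exact List.mem_cons_of_mem _ h
    have hlen := List.Subperm.length_le (List.subperm_of_subset hnd hsub')
    simp only [List.length_cons] at hlen
    omega
  | succ f ih =>
    intro m hnd hsub hre hst hfuel
    rcases hp : mvPassB boxes dy (m, false) with ⟨m', ch⟩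
    have hunf : mvSatB boxes dy (f + 1) m = if ch then mvSatB boxes dy f m' else m' := by
      simp [mvSatB, hp]
    cases ch with
    | false =>
      rw [hunf]
      simp only [Bool.false_eq_true, if_false]
      have hsnd : (mvPassB boxes dy (m, false)).2 = false := by rw [hp]
      have hfix := mvPassB_fix dy boxes m hsnd
      have hm'eq : m' = m := by
        have := hfix.1; rw [hp] at this; exact this
      subst hm'eq
      refine ⟨hre, hst, ?_⟩
      intro p b hpm hrel
      by_contra hb
      have hguard := hfix.2 b hrel.1 hb
      have := (mvParent_iff m' dy b).mpr ⟨p, hpm, hrel.2.1, hrel.2.2⟩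
      rw [hguard] at this
      exact Bool.false_ne_true this
    | true =>
      rw [hunf]
      simp only [if_true]
      have hpre := mvPassB_prefix dy boxes m false
      rw [hp] at hpre
      have hgrow := mvPassB_grow dy boxes m (by rw [hp])
      rw [hp] at hgrow
      simp only at hgrow
      refine ih m' ?_ ?_ ?_ ?_ ?_
      · have := mvPassB_nodup dy boxes m false hnd; rw [hp] at this; exact this
      · intro c hc
        have := mvPassB_mem dy boxes m false c (by rw [hp]; exact hc)
        rcases this with h | h
        · exact hsub c h
        · exact Or.inr h
      · intro c hc
        exact mvPassB_reach boxes dy start boxes (fun b hb => hb) m false hre c (by rw [hp]; exact hc)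
      · exact hpre.subset hst
      · omega

lemma mvSatB_mem (boxes : List (Int × Int)) (dy : Int) (start : Int × Int) :
    ∀ c, c ∈ mvSatB boxes dy (boxes.length + 1) [start] ↔ mvReach boxes dy start c := by
  obtain ⟨hre, hst, hcl⟩ := mvSatB_spec boxes dy start (boxes.length + 1) [start]
    (List.nodup_singleton start)
    (by intro c hc; rw [List.mem_singleton] at hc; exact Or.inl hc)
    (by intro c hc; rw [List.mem_singleton] at hc; subst hc; exact Relation.ReflTransGen.refl)
    (List.mem_singleton_self start)
    (by simp)
  intro c
  constructor
  · exact fun hc => hre c hc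
  · intro hr
    induction hr with
    | refl => exact hst
    | tail _ hrel ihr => exact hcl _ _ ihr hrel

lemma mvAdd_step (boxes walls : List (Int × Int)) (dy : Int) (start : Int × Int) (hdy : dy ≠ 0)
    (h c : Int × Int) (hc2 : c.2 = h.2 + dy) (hc1 : c.1 = h.1 - 1 ∨ c.1 = h.1 ∨ c.1 = h.1 + 1)
    (s m : List (Int × Int)) (hmid : mvMidInv boxes walls dy start h s m) :
    mvMidInv boxes walls dy start h (mvAddB boxes (s, m) c).1 (mvAddB boxes (s, m) c).2 ∧
    m ⊆ (mvAddB boxes (s, m) c).2 ∧ (c ∈ boxes → c ∈ (mvAddB boxes (s, m) c).2) ∧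
    (mvAddB boxes (s, m) c).2.length + s.length = m.length + (mvAddB boxes (s, m) c).1.length := by
  have hd : 0 < dy * dy := mul_self_pos.mpr hdy
  obtain ⟨h1, h2, h3, h4, h5, h6, h7, h8, h9, h10, h11, h12, h13⟩ := hmid
  have hoc : dy * c.2 = dy * h.2 + dy * dy := by rw [hc2]; ring
  unfold mvAddB
  cases hb : boxes.contains c with
  | false =>
    simp only [Bool.false_eq_true, if_false]
    refine ⟨⟨h1, h2, h3, h4, h5, h6, h7, h8, h9, h10, h11, h12, h13⟩, fun a ha => ha, ?_, ?_⟩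
    · intro hcb
      have hx := List.contains_iff_mem.mpr hcb
      rw [hb] at hx
      cases hx
    · trivial
  | true =>
    simp only [if_true]
    have hcbox : c ∈ boxes := List.contains_iff_mem.mp hb
    by_cases hcm : c ∈ m
    · have hcs : c ∈ s := by
        by_contra hcs
        have := h9 c hcm hcs
        omega
      rw [PySem.Set.add_of_mem hcs, PySem.Set.add_of_mem hcm]
      exact ⟨⟨h1, h2, h3, h4, h5, h6, h7, h8, h9, h10, h11, h12, h13⟩, fun a ha => ha,
        fun _ => hcm, rfl⟩
    · have hcs : c ∉ s := fun hx => hcm (h1 hx)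
      rw [PySem.Set.add_of_not_mem hcs, PySem.Set.add_of_not_mem hcm]
      have hhc : h ≠ c := by
        intro he
        rw [← he] at hoc
        omega
      refine ⟨⟨?_, ?_, ?_, ?_, ?_, ?_, ?_, ?_, ?_, ?_, ?_, ?_, ?_⟩, ?_, ?_, ?_⟩
      · intro a ha
        rcases List.mem_append.mp ha with hx | hx
        · exact List.mem_append_left _ (h1 hx)
        · exact List.mem_append_right _ hx
      · simp [List.nodup_append, h2]
        intro a b' hab heq
        exact hcm (heq ▸ hab)
      · simp [List.nodup_append, h3]
        intro a b' hab heq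
        exact hcs (heq ▸ hab)
      · intro a ha
        rcases List.mem_append.mp ha with hx | hx
        · exact h4 a hx
        · rw [List.mem_singleton] at hx
          subst hx
          exact Relation.ReflTransGen.tail (h4 h h12) ⟨hcbox, hc2, hc1⟩
      · intro a ha
        rcases List.mem_append.mp ha with hx | hx
        · exact h5 a hx
        · rw [List.mem_singleton] at hx
          subst hx
          exact Or.inr hcbox
      · intro p hpm hps
        rcases List.mem_append.mp hpm with hx | hx
        · have hps' : p ∉ s := fun hy => hps (List.mem_append_left _ hy)
          rcases h6 p hx hps' with he | ⟨hwp, hbp⟩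
          · exact Or.inl he
          · exact Or.inr ⟨hwp, fun b hb' => List.mem_append_left _ (hbp b hb')⟩
        · rw [List.mem_singleton] at hx
          subst hx
          exact absurd (List.mem_append_right _ (List.mem_singleton_self _)) hps
      · exact List.mem_append_left _ h7
      · rw [List.pairwise_append]
        refine ⟨h8, List.pairwise_singleton _ _, ?_⟩
        intro a ha b hb'
        rw [List.mem_singleton] at hb'
        subst hb'
        have := h11 a ha
        omega
      · intro p hpm hps
        rcases List.mem_append.mp hpm with hx | hx
        · exact h9 p hx (fun hy => hps (List.mem_append_left _ hy))
        · rw [List.mem_singleton] at hx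
          subst hx
          exact absurd (List.mem_append_right _ (List.mem_singleton_self _)) hps
      · intro q hq
        rcases List.mem_append.mp hq with hx | hx
        · exact h10 q hx
        · rw [List.mem_singleton] at hx
          subst hx
          omega
      · intro q hq
        rcases List.mem_append.mp hq with hx | hx
        · exact h11 q hx
        · rw [List.mem_singleton] at hx
          subst hx
          omega
      · exact List.mem_append_left _ h12
      · intro hx
        rcases List.mem_append.mp hx with hy | hy
        · exact h13 hy
        · rw [List.mem_singleton] at hy
          exact hhc hy
      · exact fun a ha => List.mem_append_left _ ha
      · exact fun _ => List.mem_append_right _ (List.mem_singleton_self _)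
      · simp only [List.length_append, List.length_cons, List.length_nil]
        omega

lemma mvMid_to_inv (boxes walls : List (Int × Int)) (dy : Int) (start h : Int × Int)
    (s m : List (Int × Int)) (hmid : mvMidInv boxes walls dy start h s m)
    (hw : ¬ mvWall walls dy h) (hch : ∀ b, mvRel boxes dy h b → b ∈ m) :
    mvInvA boxes walls dy start s m := by
  obtain ⟨h1, h2, h3, h4, h5, h6, h7, h8, h9, h10, h11, _, _⟩ := hmid
  refine ⟨h1, h2, h3, h4, h5, ?_, h7, h8, ?_, ?_⟩
  · intro p hpm hps
    rcases h6 p hpm hps with he | hok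
    · subst he
      exact ⟨hw, hch⟩
    · exact hok
  · intro a ha b hb
    have := h11 a ha
    have := h10 b hb
    omega
  · intro p hpm hps q hq
    have := h9 p hpm hps
    have := h10 q hq
    omega

lemma mvFold_eq (boxes walls : List (Int × Int)) (dy : Int) (t : Int × Int)
    (rest toMove : List (Int × Int)) :
    [(-1 : Int), 0, 1].foldl (mvStepA boxes walls dy t) (some (rest, toMove)) =
    if walls.contains (t.1, t.2 + dy) || walls.contains (t.1 + 1, t.2 + dy) then none
    else some (mvAddB boxes (mvAddB boxes (mvAddB boxes (rest, toMove) (t.1 - 1, t.2 + dy)) (t.1, t.2 + dy)) (t.1 + 1, t.2 + dy)) := by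
  have h0 : ((0 : Int) != -1) = true := by decide
  have h1 : ((1 : Int) != -1) = true := by decide
  by_cases hb0 : (t.1 + -1, t.2 + dy) ∈ boxes <;>
  by_cases hw0 : (t.1, t.2 + dy) ∈ walls <;>
  by_cases hb1 : (t.1, t.2 + dy) ∈ boxes <;>
  by_cases hw1 : (t.1 + 1, t.2 + dy) ∈ walls <;>
  by_cases hb2 : (t.1 + 1, t.2 + dy) ∈ boxes <;>
    simp [mvStepA, mvAddB, h0, h1, hb0, hw0, hb1, hw1, hb2, sub_eq_add_neg,
      List.contains_iff_mem]

lemma mvInvA_term (boxes walls : List (Int × Int)) (dy : Int) (start : Int × Int)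
    (toMove : List (Int × Int)) (hinv : mvInvA boxes walls dy start [] toMove) :
    (∀ c, c ∈ toMove ↔ mvReach boxes dy start c) ∧ (∀ c ∈ toMove, ¬ mvWall walls dy c) := by
  obtain ⟨h1, h2, h3, h4, h5, h6, h7, h8, h9, h10⟩ := hinv
  constructor
  · intro c
    constructor
    · exact fun hc => h4 c hc
    · intro hr
      induction hr with
      | refl => exact h7
      | tail _ hrel ihr => exact (h6 _ ihr (by simp)).2 _ hrel
  · intro c hc
    exact (h6 c hc (by simp)).1

lemma mvLoopA_spec (boxes walls : List (Int × Int)) (dy : Int) (start : Int × Int) (hdy : dy ≠ 0) :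
    ∀ (f : Nat) (span toMove : List (Int × Int)),
    mvInvA boxes walls dy start span toMove →
    boxes.length + 2 + span.length ≤ f + toMove.length →
    (mvLoopA boxes walls dy f span toMove = none →
      ∃ c, mvReach boxes dy start c ∧ mvWall walls dy c) ∧
    (∀ T, mvLoopA boxes walls dy f span toMove = some T →
      (∀ c, c ∈ T ↔ mvReach boxes dy start c) ∧ (∀ c ∈ T, ¬ mvWall walls dy c)) := by
  intro f
  induction f with
  | zero =>
    intro span toMove hinv hfuel
    cases span with
    | nil =>
      have hred : mvLoopA boxes walls dy 0 [] toMove = some toMove := rfl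
      constructor
      · intro hnone
        rw [hred] at hnone
        cases hnone
      · intro T hT
        rw [hred] at hT
        obtain rfl := Option.some.inj hT
        exact mvInvA_term boxes walls dy start toMove hinv
    | cons h rest =>
      exfalso
      obtain ⟨h1, h2, _, _, h5, _, _, _, _, _⟩ := hinv
      have hsub' : toMove ⊆ start :: boxes := by
        intro c hc
        rcases h5 c hc with hx | hx
        · simp [hx]
        · exact List.mem_cons_of_mem _ hx
      have hlen := List.Subperm.length_le (List.subperm_of_subset h2 hsub')
      simp only [List.length_cons] at hlen hfuel
      omega
  | succ f ih =>
    intro span toMove hinv hfuel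
    cases span with
    | nil =>
      have hred : mvLoopA boxes walls dy (f + 1) [] toMove = some toMove := rfl
      constructor
      · intro hnone
        rw [hred] at hnone
        cases hnone
      · intro T hT
        rw [hred] at hT
        obtain rfl := Option.some.inj hT
        exact mvInvA_term boxes walls dy start toMove hinv
    | cons h rest =>
      have hstep : mvLoopA boxes walls dy (f + 1) (h :: rest) toMove =
          match [(-1 : Int), 0, 1].foldl (mvStepA boxes walls dy h) (some (rest, toMove)) with
          | none => none
          | some (span', toMove') => mvLoopA boxes walls dy f span' toMove' := rfl
      rw [hstep, mvFold_eq]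
      cases hw : (walls.contains (h.1, h.2 + dy) || walls.contains (h.1 + 1, h.2 + dy)) with
      | true =>
        simp only [if_true]
        obtain ⟨h1, _, _, h4, _, _, _, _, _, _⟩ := hinv
        constructor
        · intro _
          refine ⟨h, h4 h (h1 (List.mem_cons_self ..)), ?_⟩
          by_cases hx : (h.1, h.2 + dy) ∈ walls
          · exact Or.inl hx
          · refine Or.inr ?_
            by_cases hy : (h.1 + 1, h.2 + dy) ∈ walls
            · exact hy
            · exfalso
              have hcx : walls.contains (h.1, h.2 + dy) = false := by
                rcases hc : walls.contains (h.1, h.2 + dy) with _ | _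
                · rfl
                · exact absurd (List.contains_iff_mem.mp hc) hx
              have hcy : walls.contains (h.1 + 1, h.2 + dy) = false := by
                rcases hc : walls.contains (h.1 + 1, h.2 + dy) with _ | _
                · rfl
                · exact absurd (List.contains_iff_mem.mp hc) hy
              rw [hcx, hcy] at hw
              cases hw
        · intro T hT
          cases hT
      | false =>
        simp only [Bool.false_eq_true, if_false]
        have hnw : ¬ mvWall walls dy h := by
          intro hwall
          rcases hwall with hm1 | hm1
          · rw [List.contains_iff_mem.mpr hm1] at hw
            simp at hw
          · rw [List.contains_iff_mem.mpr hm1] at hw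
            simp at hw
        obtain ⟨h1, h2, h3, h4, h5, h6, h7, h8, h9, h10⟩ := hinv
        have hmid0 : mvMidInv boxes walls dy start h rest toMove := by
          refine ⟨fun a ha => h1 (List.mem_cons_of_mem _ ha), h2, (List.nodup_cons.mp h3).2,
            h4, h5, ?_, h7, (List.pairwise_cons.mp h8).2, ?_, ?_, ?_,
            h1 (List.mem_cons_self ..), (List.nodup_cons.mp h3).1⟩
          · intro p hpm hps
            by_cases hph : p = h
            · exact Or.inl hph
            · refine Or.inr (h6 p hpm ?_)
              intro hx
              rcases List.mem_cons.mp hx with hy | hy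
              · exact hph hy
              · exact hps hy
          · intro p hpm hps
            by_cases hph : p = h
            · subst hph; exact le_refl _
            · have hps' : p ∉ h :: rest := by
                intro hx
                rcases List.mem_cons.mp hx with hy | hy
                · exact hph hy
                · exact hps hy
              exact h10 p hpm hps' h (List.mem_cons_self ..)
          · intro q hq
            exact (List.pairwise_cons.mp h8).1 q hq
          · intro q hq
            exact h9 q (List.mem_cons_of_mem _ hq) h (List.mem_cons_self ..)
        have st1 := mvAdd_step boxes walls dy start hdy h (h.1 - 1, h.2 + dy) rfl
          (Or.inl rfl) rest toMove hmid0
        have st2 := mvAdd_step boxes walls dy start hdy h (h.1, h.2 + dy) rfl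
          (Or.inr (Or.inl rfl)) (mvAddB boxes (rest, toMove) (h.1 - 1, h.2 + dy)).1
          (mvAddB boxes (rest, toMove) (h.1 - 1, h.2 + dy)).2 st1.1
        have st3 := mvAdd_step boxes walls dy start hdy h (h.1 + 1, h.2 + dy) rfl
          (Or.inr (Or.inr rfl))
          (mvAddB boxes (mvAddB boxes (rest, toMove) (h.1 - 1, h.2 + dy)) (h.1, h.2 + dy)).1
          (mvAddB boxes (mvAddB boxes (rest, toMove) (h.1 - 1, h.2 + dy)) (h.1, h.2 + dy)).2 st2.1
        have hch : ∀ b, mvRel boxes dy h b →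
            b ∈ (mvAddB boxes (mvAddB boxes (mvAddB boxes (rest, toMove) (h.1 - 1, h.2 + dy)) (h.1, h.2 + dy)) (h.1 + 1, h.2 + dy)).2 := by
          intro b hrel
          obtain ⟨hbB, hb2, hb1⟩ := hrel
          have hbpair : b = (b.1, b.2) := rfl
          rcases hb1 with e | e | e
          · have hbe : b = (h.1 - 1, h.2 + dy) := by
              rw [hbpair, e, hb2]
            rw [hbe] at hbB ⊢
            exact st3.2.1 (st2.2.1 (st1.2.2.1 hbB))
          · have hbe : b = (h.1, h.2 + dy) := by
              rw [hbpair, e, hb2]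
            rw [hbe] at hbB ⊢
            exact st3.2.1 (st2.2.2.1 hbB)
          · have hbe : b = (h.1 + 1, h.2 + dy) := by
              rw [hbpair, e, hb2]
            rw [hbe] at hbB ⊢
            exact st3.2.2.1 hbB
        have hinv3 := mvMid_to_inv boxes walls dy start h _ _ st3.1 hnw hch
        have hc1 := st1.2.2.2
        have hc2 := st2.2.2.2
        have hc3 := st3.2.2.2
        have eA2 : ((mvAddB boxes (rest, toMove) (h.1 - 1, h.2 + dy)).1,
            (mvAddB boxes (rest, toMove) (h.1 - 1, h.2 + dy)).2) =
            mvAddB boxes (rest, toMove) (h.1 - 1, h.2 + dy) := rfl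
        rw [eA2] at hc2
        have eA3 : ((mvAddB boxes (mvAddB boxes (rest, toMove) (h.1 - 1, h.2 + dy)) (h.1, h.2 + dy)).1,
            (mvAddB boxes (mvAddB boxes (rest, toMove) (h.1 - 1, h.2 + dy)) (h.1, h.2 + dy)).2) =
            mvAddB boxes (mvAddB boxes (rest, toMove) (h.1 - 1, h.2 + dy)) (h.1, h.2 + dy) := rfl
        rw [eA3] at hc3 hinv3
        simp only [List.length_cons] at hfuel
        exact ih _ _ hinv3 (by omega)

lemma mvCommit_congr (boxes : List (Int × Int)) (dy : Int) (start : Int × Int)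
    (T M : List (Int × Int)) (hiff : ∀ b, b ∈ T ↔ b ∈ M) :
    mvCommit boxes dy start T = mvCommit boxes dy start M := by
  have hc : ∀ b, T.contains b = M.contains b := by
    intro b
    rcases hT : T.contains b with _ | _ <;> rcases hM : M.contains b with _ | _
    · rfl
    · exact absurd ((hiff b).mpr (List.contains_iff_mem.mp hM))
        (fun hx => by rw [List.contains_iff_mem.mpr hx] at hT; cases hT)
    · exact absurd ((hiff b).mp (List.contains_iff_mem.mp hT))
        (fun hx => by rw [List.contains_iff_mem.mpr hx] at hM; cases hM)
    · rfl
  unfold mvCommit PySem.Set.diff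
  simp only [PySem.Set.contains, hc]

lemma mvInvA_init (boxes walls : List (Int × Int)) (dy : Int) (start : Int × Int) :
    mvInvA boxes walls dy start [start] [start] := by
  have hnn : (0 : Int) ≤ dy * dy := mul_self_nonneg dy
  refine ⟨fun a ha => ha, List.nodup_singleton _, List.nodup_singleton _, ?_, ?_, ?_,
    List.mem_singleton_self _, List.pairwise_singleton _ _, ?_, ?_⟩
  · intro c hc
    rw [List.mem_singleton] at hc
    subst hc
    exact Relation.ReflTransGen.refl
  · intro c hc
    rw [List.mem_singleton] at hc
    exact Or.inl hc
  · intro p hp hps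
    rw [List.mem_singleton] at hp
    subst hp
    exact absurd (List.mem_singleton_self _) hps
  · intro a ha b hb
    rw [List.mem_singleton] at ha hb
    subst ha; subst hb
    omega
  · intro p hp hps
    rw [List.mem_singleton] at hp
    subst hp
    exact absurd (List.mem_singleton_self _) hps

lemma mvMain (dy : Int) (hdy : dy ≠ 0) (x y : Int) (boxes walls : List (Int × Int))
    (start : Int × Int) :
    (match mvLoopA boxes walls dy (boxes.length + 2) [start] [start] with
      | none => (boxes, x, y)
      | some toMove => (mvCommit boxes dy start toMove, x, y + dy)) =
    (if (mvSatB boxes dy (boxes.length + 1) [start]).any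
        (fun m => walls.contains (m.1, m.2 + dy) || walls.contains (m.1 + 1, m.2 + dy)) then
      (boxes, x, y)
    else (mvCommit boxes dy start (mvSatB boxes dy (boxes.length + 1) [start]), x, y + dy)) := by
  have hInit := mvInvA_init boxes walls dy start
  have hspec := mvLoopA_spec boxes walls dy start hdy (boxes.length + 2) [start] [start] hInit
    (by simp)
  have hMmem := mvSatB_mem boxes dy start
  cases hres : mvLoopA boxes walls dy (boxes.length + 2) [start] [start] with
  | none =>
    obtain ⟨c, hreach, hwall⟩ := hspec.1 hres
    have hany : (mvSatB boxes dy (boxes.length + 1) [start]).any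
        (fun m => walls.contains (m.1, m.2 + dy) || walls.contains (m.1 + 1, m.2 + dy)) = true := by
      refine List.any_eq_true.mpr ⟨c, (hMmem c).mpr hreach, ?_⟩
      rcases hwall with hx | hx
      · rw [List.contains_iff_mem.mpr hx]
        rfl
      · rw [List.contains_iff_mem.mpr hx]
        simp
    rw [hany]
    simp only [if_true]
  | some T =>
    obtain ⟨hmemT, hnowall⟩ := hspec.2 T hres
    have hanyf : (mvSatB boxes dy (boxes.length + 1) [start]).any
        (fun m => walls.contains (m.1, m.2 + dy) || walls.contains (m.1 + 1, m.2 + dy)) = false := by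
      rw [List.any_eq_false]
      intro m hm
      have hnw := hnowall m ((hmemT m).mpr ((hMmem m).mp hm))
      intro hx
      rcases hcx : walls.contains (m.1, m.2 + dy) with _ | _
      · rcases hcy : walls.contains (m.1 + 1, m.2 + dy) with _ | _
        · rw [hcx, hcy] at hx
          cases hx
        · exact hnw (Or.inr (List.contains_iff_mem.mp hcy))
      · exact hnw (Or.inl (List.contains_iff_mem.mp hcx))
    rw [hanyf]
    simp only [Bool.false_eq_true, if_false, Prod.mk.injEq, and_true]
    exact mvCommit_congr boxes dy start T _ (fun b => (hmemT b).trans (hMmem b).symm)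

-- ===== VERDICT (by name: the statement is the Claim_ definition above) =====
theorem move_vertically_spec : Claim_equal_move_vertically := by
  intro x y dy boxes walls _ hdy
  unfold Spec_move_vertically move_vertically move_vertically_alt
  exact mvMain dy hdy x y boxes walls
    (x - (if boxes.contains (x - 1, y + dy) then (1 : Int) else 0), y + dy)
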